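-- pv_equiv track=rewrite | github.com/DyogenIBENS/LibsDyogen_py3 | myProteinTree.py | getDupSuffix
-- ===== SOURCE A (Python) =====
-- def getDupSuffix(n, upper=False):
--     """Return the suffix associated to a duplication rank `n`.
--
--     Encodes n-1 in base 26, written with higher orders on the *right*:
--
--     1: 'a'  -> 26:'z'
--     27:'ab' -> 52:'zb', ...
--     """
--     base = 64 if upper else 96
--     assert 1 <= n
--     n -= 1
--     s = "."
--     while n >= 26:
--         s = s + chr(base + 1 + n % 26)
--         assert s[-1] in 'abcdefghijklmnopqrstuvwxyzABCDEFGHIJKLMNOPQRSTUVWXYZ', \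
--                 "%r: %d" % (s[-1], ord(s[-1]))
--         n //= 26
--     return s + chr(base + 1 + n)
-- ===== SOURCE B (Python) =====
-- def getDupSuffix(n, upper=False):
--     """Return the suffix associated to a duplication rank `n`."""
--     assert 1 <= n
--     a = ord('A') if upper else ord('a')
--     m = n - 1
--     k = 1
--     while 26 ** k <= m:
--         k += 1
--     return '.' + ''.join(chr(a + m // 26 ** i % 26) for i in range(k))
-- ===== Notes on version B (the rewrite author's own statement) =====
-- stated objective: alternative
-- what changed: Instead of A's destructive while-loop that divides n by 26 while appending to a string accumulator, B first counts the digits k (smallest k with 26**k > n-1) and then builds the suffix positionally as ''.join(chr(a + (n-1)//26**i % 26) for i in range(k)), extracting each digit independently by a power-of-26 formula.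
import Mathlib
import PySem

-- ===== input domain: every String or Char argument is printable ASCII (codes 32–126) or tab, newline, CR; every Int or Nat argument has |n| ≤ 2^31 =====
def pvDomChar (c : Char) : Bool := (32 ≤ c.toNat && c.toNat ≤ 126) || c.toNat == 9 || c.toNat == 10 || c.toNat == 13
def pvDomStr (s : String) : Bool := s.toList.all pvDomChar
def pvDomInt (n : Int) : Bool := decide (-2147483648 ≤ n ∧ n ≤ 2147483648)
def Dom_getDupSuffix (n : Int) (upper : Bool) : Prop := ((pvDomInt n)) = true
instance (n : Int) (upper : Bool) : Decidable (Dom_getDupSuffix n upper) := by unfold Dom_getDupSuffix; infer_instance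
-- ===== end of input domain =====

-- B replaces A's divide-and-append accumulator loop by counting the digits first and extracting each digit positionally via powers of 26 (alternative decomposition, same practical cost).


-- ===== PORT A =====
-- the while loop: s = s + chr(base+1+n%26); n //= 26, then the final s + chr(base+1+n)
def getDupSuffixLoop (base : Int) (s : String) (n : Int) : String :=
  if 26 ≤ n then
    getDupSuffixLoop base (s ++ String.ofList [Char.ofNat (base + 1 + PySem.Int.mod n 26).toNat]) (PySem.Int.floordiv n 26)
  else s ++ String.ofList [Char.ofNat (base + 1 + n).toNat]
termination_by n.toNat
decreasing_by
  have h1 : PySem.Int.floordiv n 26 = n / 26 := PySem.Int.floordiv_eq_ediv_of_pos (by omega)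
  have : n / 26 < n := by omega
  omega

def getDupSuffix (n : Int) (upper : Bool) : String :=
  let base : Int := if upper then 64 else 96
  getDupSuffixLoop base "." (n - 1)

-- ===== PORT B =====
-- the while loop: k += 1 while 26**k <= m  (k strictly increases; terminates because 26^k outgrows m)
def numDigits (m : Int) (k : Nat) : Nat :=
  if (26 : Int) ^ k ≤ m then numDigits m (k + 1) else k
termination_by m.toNat + 1 - 26 ^ k
decreasing_by
  have h26 : (26 : Int) ^ k = ((26 ^ k : Nat) : Int) := by push_cast; ring
  have hk : 26 ^ k < 26 ^ (k + 1) := Nat.pow_lt_pow_right (by omega) (by omega)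
  have : 26 ^ k ≤ m.toNat := by omega
  omega

def getDupSuffix_alt (n : Int) (upper : Bool) : String :=
  let a : Int := if upper then 65 else 97
  let m := n - 1
  let k := numDigits m 1
  "." ++ String.ofList ((List.range k).map (fun i =>
    Char.ofNat (a + PySem.Int.mod (PySem.Int.floordiv m ((26 : Int) ^ i)) 26).toNat))

-- ===== PRECONDITION & SPEC =====
-- Pre_: both programs 'assert 1 <= n' and raise AssertionError otherwise.
def Pre_getDupSuffix (n : Int) (upper : Bool) : Prop := 1 ≤ n
instance (n : Int) (upper : Bool) : Decidable (Pre_getDupSuffix n upper) := by unfold Pre_getDupSuffix; infer_instance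
def pvWitness_getDupSuffix : Int × Bool := (27, false)

def Spec_getDupSuffix (n : Int) (upper : Bool) (out : String) : Prop := out = getDupSuffix_alt n upper
instance (n : Int) (upper : Bool) (out : String) : Decidable (Spec_getDupSuffix n upper out) := by unfold Spec_getDupSuffix; infer_instance

-- ===== CLAIM (what is proved, stated in full; the proofs are below) =====
def Claim_equal_getDupSuffix : Prop := ∀ (n : Int) (upper : Bool), Dom_getDupSuffix n upper → Pre_getDupSuffix n upper → Spec_getDupSuffix n upper (getDupSuffix n upper)

-- ===== LEMMAS AND PROOFS =====

theorem numDigits_shift (m : Int) (hm : 0 ≤ m) :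
    ∀ f k : Nat, m.toNat + 1 ≤ f + 26 ^ k → numDigits m (k + 1) = numDigits (m / 26) k + 1 := by
  intro f
  induction f with
  | zero =>
    intro k hf
    have hcast : ((26 ^ k : Nat) : Int) = (26 : Int) ^ k := by push_cast; ring
    have hle : (26 : Int) ^ k ≤ (26 : Int) ^ (k + 1) :=
      pow_le_pow_right₀ (by norm_num) (by omega)
    have hmlt : m < (26 : Int) ^ k := by omega
    have hdle : m / 26 ≤ m := Int.ediv_le_self _ hm
    rw [numDigits, if_neg (by omega), numDigits, if_neg (by omega)]
  | succ f ih =>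
    intro k hf
    have hcond : (26 : Int) ^ k ≤ m / 26 ↔ (26 : Int) ^ (k + 1) ≤ m := by
      rw [Int.le_ediv_iff_mul_le (by norm_num), ← pow_succ]
    by_cases h : (26 : Int) ^ (k + 1) ≤ m
    · have hcastk : ((26 ^ (k + 1) : Nat) : Int) = (26 : Int) ^ (k + 1) := by push_cast; ring
      have hlt : 26 ^ k < 26 ^ (k + 1) := Nat.pow_lt_pow_right (by omega) (by omega)
      rw [numDigits, if_pos h]
      conv_rhs => rw [numDigits, if_pos (hcond.mpr h)]
      exact ih (k + 1) (by omega)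
    · rw [numDigits, if_neg h]
      conv_rhs => rw [numDigits, if_neg (fun hc => h (hcond.mp hc))]

theorem loop_eq (base : Int) (k : Nat) :
    ∀ m : Int, m.toNat = k → 0 ≤ m → ∀ s,
      getDupSuffixLoop base s m =
        s ++ String.ofList ((List.range (numDigits m 1)).map (fun i =>
          Char.ofNat (base + 1 + PySem.Int.mod (PySem.Int.floordiv m ((26 : Int) ^ i)) 26).toNat)) := by
  induction k using Nat.strong_induction_on with
  | _ k ih =>
    intro m hk hm s
    have h1 : PySem.Int.floordiv m ((26 : Int) ^ 0) = m := by
      rw [pow_zero, PySem.Int.floordiv_eq_ediv_of_pos (by norm_num), Int.ediv_one]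
    by_cases h : (26 : Int) ≤ m
    · have hd : PySem.Int.floordiv m 26 = m / 26 := PySem.Int.floordiv_eq_ediv_of_pos (by omega)
      have hq0 : 0 ≤ m / 26 := Int.ediv_nonneg hm (by norm_num)
      have hqlt : m / 26 < m := by
        have := Int.ediv_le_self 26 hm
        have h2 : m / 26 ≠ m := by
          intro he
          have := Int.ediv_add_emod m 26
          have := Int.emod_nonneg m (by norm_num : (26:Int) ≠ 0)
          nlinarith
        omega
      have hnd1 : numDigits (m / 26) 0 = numDigits (m / 26) 1 := by
        rw [numDigits, if_pos (by rw [pow_zero]; omega)]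
      have hnd : numDigits m 1 = numDigits (m / 26) 1 + 1 := by
        have := numDigits_shift m hm (m.toNat + 1) 0 (by simp)
        rwa [hnd1] at this
      rw [getDupSuffixLoop, if_pos h, hd,
        ih (m / 26).toNat (by omega) _ rfl hq0, String.append_assoc]
      congr 1
      rw [hnd, List.range_succ_eq_map, List.map_cons, List.map_map,
        ← String.ofList_append, List.singleton_append]
      congr 2
      · rw [h1]
      · refine List.map_congr_left (fun i _ => ?_)
        simp only [Function.comp_apply]
        rw [PySem.Int.floordiv_eq_ediv_of_pos (b := (26:Int) ^ i) (by positivity),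
          PySem.Int.floordiv_eq_ediv_of_pos (b := (26:Int) ^ (i + 1)) (by positivity),
          Int.ediv_ediv_of_nonneg (by norm_num), ← pow_succ']
    · have hmod : PySem.Int.mod m 26 = m := by
        rw [PySem.Int.mod_eq_emod_of_pos (by norm_num), Int.emod_eq_of_lt hm (by omega)]
      have hnd : numDigits m 1 = 1 := by
        rw [numDigits, if_neg (by rw [pow_one]; omega)]
      rw [getDupSuffixLoop, if_neg h, hnd]
      simp only [List.range_one, List.map_cons, List.map_nil, h1]
      rw [PySem.Int.mod_eq_emod_of_pos (by norm_num), Int.emod_eq_of_lt hm (by omega)]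

-- ===== VERDICT (by name: the statement is the Claim_ definition above) =====
theorem getDupSuffix_spec : Claim_equal_getDupSuffix := by
  intro n upper _ hpre
  unfold Pre_getDupSuffix at hpre
  unfold Spec_getDupSuffix getDupSuffix getDupSuffix_alt
  cases upper <;> simpa using loop_eq _ (n - 1).toNat (n - 1) rfl (by omega) "."
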